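-- pv_equiv track=rewrite | github.com/gsdamjanovski/hansardy | backend/eval/eval_runner.py | _source_date_range
-- ===== SOURCE A (Python) =====
-- def _source_date_range(sources: list[dict]) -> dict | None:
--     """Extract the min/max sitting dates from sources."""
--     dates = [
--         s["sitting_date"]
--         for s in sources
--         if s.get("sitting_date")
--     ]
--     if not dates:
--         return None
--     return {"earliest": min(dates), "latest": max(dates)}
-- ===== SOURCE B (Python) =====
-- def _source_date_range(sources: list[dict]) -> dict | None:
--     """Extract the min/max sitting dates from sources (single pass)."""
--     earliest = latest = None
--     for s in sources:
--         d = s.get("sitting_date")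
--         if not d:
--             continue
--         if earliest is None:
--             earliest = latest = d
--         else:
--             if d < earliest:
--                 earliest = d
--             if latest < d:
--                 latest = d
--     if earliest is None:
--         return None
--     return {"earliest": earliest, "latest": latest}
-- ===== Notes on version B (the rewrite author's own statement) =====
-- stated objective: alternative
-- what changed: Replaced the intermediate dates list plus separate min() and max() passes with a single loop over sources that maintains running earliest/latest values and no intermediate list.
import Mathlib
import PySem

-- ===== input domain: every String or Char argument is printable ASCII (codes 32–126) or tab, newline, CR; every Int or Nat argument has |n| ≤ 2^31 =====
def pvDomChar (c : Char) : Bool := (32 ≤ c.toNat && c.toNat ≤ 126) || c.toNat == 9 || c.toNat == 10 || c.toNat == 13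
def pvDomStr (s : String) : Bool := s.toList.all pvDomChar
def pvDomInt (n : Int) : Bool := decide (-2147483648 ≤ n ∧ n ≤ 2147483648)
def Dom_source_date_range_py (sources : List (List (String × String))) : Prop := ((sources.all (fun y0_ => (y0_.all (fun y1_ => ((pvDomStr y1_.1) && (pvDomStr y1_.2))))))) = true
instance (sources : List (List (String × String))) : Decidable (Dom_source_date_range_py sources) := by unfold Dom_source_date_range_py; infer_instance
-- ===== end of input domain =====

-- B replaces the intermediate dates list plus separate min()/max() passes by a single
-- running-extrema loop over sources (objective: alternative decomposition, same cost).

-- ===== PORT A =====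
-- s.get("sitting_date") truthy (non-empty string) filter, then s["sitting_date"]
def source_date_range_py (sources : List (List (String × String))) : Option (List (String × String)) :=
  let dates := sources.filterMap (fun s =>
    match s.lookup "sitting_date" with
    | some d => if d = "" then none else some d
    | none => none)
  if dates = [] then none
  else
    some [("earliest", (PySem.List.min? dates (fun y => y)).getD ""),
          ("latest", (PySem.List.max? dates (fun y => y)).getD "")]

-- ===== PORT B =====
def source_date_range_py_alt (sources : List (List (String × String))) : Option (List (String × String)) :=
  let st := sources.foldl (fun (st : Option (String × String)) s =>
    match s.lookup "sitting_date" with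
    | none => st
    | some d =>
      if d = "" then st
      else
        match st with
        | none => some (d, d)
        | some (e, l) => some ((if d < e then d else e), (if l < d then d else l))) none
  match st with
  | none => none
  | some (e, l) => some [("earliest", e), ("latest", l)]

-- ===== PRECONDITION & SPEC =====
def Spec_source_date_range_py (sources : List (List (String × String))) (out : Option (List (String × String))) : Prop := out = source_date_range_py_alt sources
instance (sources : List (List (String × String))) (out : Option (List (String × String))) : Decidable (Spec_source_date_range_py sources out) := by unfold Spec_source_date_range_py; infer_instance

-- ===== CLAIM (what is proved, stated in full; the proofs are below) =====
def Claim_equal_source_date_range_py : Prop := ∀ (sources : List (List (String × String))), Dom_source_date_range_py sources → Spec_source_date_range_py sources (source_date_range_py sources)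

-- ===== LEMMAS AND PROOFS =====

-- B's per-source step, named for the proofs
def pvStepB (st : Option (String × String)) (s : List (String × String)) : Option (String × String) :=
  match s.lookup "sitting_date" with
  | none => st
  | some d =>
    if d = "" then st
    else
      match st with
      | none => some (d, d)
      | some (e, l) => some ((if d < e then d else e), (if l < d then d else l))

-- the extraction both ports perform
def pvExtract (s : List (String × String)) : Option String :=
  match s.lookup "sitting_date" with
  | some d => if d = "" then none else some d
  | none => none

-- per-date step of B
def pvStepD (st : Option (String × String)) (d : String) : Option (String × String) :=
  match st with
  | none => some (d, d)
  | some (e, l) => some ((if d < e then d else e), (if l < d then d else l))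

theorem pvStepB_eq (st : Option (String × String)) (s : List (String × String)) :
    pvStepB st s = match pvExtract s with | none => st | some d => pvStepD st d := by
  unfold pvStepB pvExtract pvStepD
  cases s.lookup "sitting_date" with
  | none => rfl
  | some d => by_cases h : d = "" <;> simp [h]

theorem pvFoldB_eq (sources : List (List (String × String))) (st : Option (String × String)) :
    sources.foldl pvStepB st = (sources.filterMap pvExtract).foldl pvStepD st := by
  induction sources generalizing st with
  | nil => rfl
  | cons s t ih =>
    simp only [List.foldl_cons, List.filterMap_cons, pvStepB_eq]
    cases h : pvExtract s with
    | none => simpa using ih st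
    | some d => simpa using ih (pvStepD st d)

theorem pvFoldD_some (t : List String) (e l : String) :
    t.foldl pvStepD (some (e, l)) = some (t.foldl min e, t.foldl max l) := by
  induction t generalizing e l with
  | nil => rfl
  | cons d t ih =>
    simp only [List.foldl_cons, pvStepD]
    have hmin : (if d < e then d else e) = min e d := by
      rcases lt_trichotomy d e with h | h | h
      · simp [h, min_eq_right h.le]
      · simp [h]
      · simp [not_lt.mpr h.le, min_eq_left h.le]
    have hmax : (if l < d then d else l) = max l d := by
      rcases lt_trichotomy l d with h | h | h
      · simp [h, max_eq_right h.le]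
      · simp [h]
      · simp [not_lt.mpr h.le, max_eq_left h.le]
    rw [hmin, hmax, ih]

theorem source_date_range_py_spec : Claim_equal_source_date_range_py := by
  unfold Claim_equal_source_date_range_py
  intro sources _
  unfold Spec_source_date_range_py source_date_range_py source_date_range_py_alt
  have hB : (sources.foldl (fun (st : Option (String × String)) s =>
      match s.lookup "sitting_date" with
      | none => st
      | some d =>
        if d = "" then st
        else
          match st with
          | none => some (d, d)
          | some (e, l) => some ((if d < e then d else e), (if l < d then d else l))) none)
      = (sources.filterMap pvExtract).foldl pvStepD none := pvFoldB_eq sources none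
  simp only [hB]
  have hFM : sources.filterMap (fun s =>
      match s.lookup "sitting_date" with
      | some d => if d = "" then none else some d
      | none => none) = sources.filterMap pvExtract := rfl
  rw [hFM]
  cases h : sources.filterMap pvExtract with
  | nil => simp
  | cons x t =>
    have hfold : (x :: t).foldl pvStepD none = some (t.foldl min x, t.foldl max x) := by
      simp only [List.foldl_cons, pvStepD]
      exact pvFoldD_some t x x
    rw [hfold]
    simp [PySem.List.min?_id_cons, PySem.List.max?_id_cons]
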